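-- pv_equiv track=rewrite | github.com/AhmedHani/Online-Judges-Problems-SourceCode | Hackerrank/Algorithms/Implementation/birthday_chocolate.py | solve
-- ===== SOURCE A (Python) =====
-- def solve(n, s, d, m):
--     count_ways = 0
--     squares_sum = 0
--
--     for i in range(0, n):
--         squares_sum += 1
--         current_sum = s[i]
--
--         if squares_sum == m:
--             if current_sum == d:
--                 count_ways += 1
--                 squares_sum = 0
--                 continue
--
--         for j in range(1, m):
--
--             if i + j <= n - 1:
--                 current_sum += s[i + j]
--
--         if current_sum == d:
--             count_ways += 1
--
--     return count_ways
-- ===== SOURCE B (Python) =====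
-- def solve(n, s, d, m):
--     # prefix sums: each window sum is O(1) instead of an O(m) inner scan
--     prefix = [0]
--     t = 0
--     for x in s[:n]:
--         t += x
--         prefix.append(t)
--     width = m if m > 1 else 1
--     count_ways = 0
--     c = 0
--     for i in range(n):
--         c += 1
--         if c == m and s[i] == d:
--             count_ways += 1
--             c = 0
--         elif prefix[min(i + width, n)] - prefix[i] == d:
--             count_ways += 1
--     return count_ways
-- ===== Notes on version B (the rewrite author's own statement) =====
-- stated objective: faster
-- what changed: B precomputes a prefix-sum array once and reads each (end-truncated) window sum as one O(1) subtraction, replacing A's O(m) inner scan per position while keeping A's squares_sum counter branch.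
import Mathlib
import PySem

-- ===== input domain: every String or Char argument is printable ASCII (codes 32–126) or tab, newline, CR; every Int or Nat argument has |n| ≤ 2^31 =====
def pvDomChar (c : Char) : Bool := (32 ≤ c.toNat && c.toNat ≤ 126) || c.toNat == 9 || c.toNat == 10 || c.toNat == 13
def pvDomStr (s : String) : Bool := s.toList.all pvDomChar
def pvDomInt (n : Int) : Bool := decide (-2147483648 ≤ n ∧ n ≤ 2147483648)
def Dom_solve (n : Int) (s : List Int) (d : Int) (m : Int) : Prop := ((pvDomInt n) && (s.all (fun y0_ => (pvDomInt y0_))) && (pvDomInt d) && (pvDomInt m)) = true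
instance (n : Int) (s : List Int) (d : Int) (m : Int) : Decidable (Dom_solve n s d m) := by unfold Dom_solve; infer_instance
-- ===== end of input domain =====

-- B replaces A's O(m) inner window scan by a prefix-sum array read in O(1); return values agree on all admitted inputs.

-- ===== PORT A =====
def solve (n : Int) (s : List Int) (d : Int) (m : Int) : Int :=
  ((PySem.List.pyRange 0 n 1).foldl (fun (st : Int × Int) i =>
    let squares_sum := st.2 + 1
    let current_sum := PySem.List.pyGetD s i 0
    if squares_sum = m ∧ current_sum = d then
      (st.1 + 1, 0)
    else
      let current_sum := (PySem.List.pyRange 1 m 1).foldl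
        (fun cur j => if i + j ≤ n - 1 then cur + PySem.List.pyGetD s (i + j) 0 else cur)
        current_sum
      if current_sum = d then (st.1 + 1, squares_sum) else (st.1, squares_sum))
    (0, 0)).1

-- ===== PORT B =====
def solve_alt (n : Int) (s : List Int) (d : Int) (m : Int) : Int :=
  let pr := (PySem.List.slice s none (some n)).foldl
    (fun (st : Int × List Int) x => (st.1 + x, st.2 ++ [st.1 + x])) (0, [0])
  let pfx := pr.2
  let width := if m > 1 then m else 1
  ((PySem.List.pyRange 0 n 1).foldl (fun (st : Int × Int) i =>
    let c := st.2 + 1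
    if c = m ∧ PySem.List.pyGetD s i 0 = d then
      (st.1 + 1, 0)
    else if PySem.List.pyGetD pfx (min (i + width) n) 0 - PySem.List.pyGetD pfx i 0 = d then
      (st.1 + 1, c)
    else (st.1, c))
    (0, 0)).1

-- ===== PRECONDITION & SPEC =====
-- Pre_ excludes n > len(s), on which A's s[i] raises IndexError.
def Pre_solve (n : Int) (s : List Int) (d : Int) (m : Int) : Prop := n ≤ (s.length : Int)
instance (n : Int) (s : List Int) (d : Int) (m : Int) : Decidable (Pre_solve n s d m) := by unfold Pre_solve; infer_instance
def pvWitness_solve : Int × List Int × Int × Int := (5, [2, 2, 1, 3, 2], 4, 2)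

def Spec_solve (n : Int) (s : List Int) (d : Int) (m : Int) (out : Int) : Prop := out = solve_alt n s d m
instance (n : Int) (s : List Int) (d : Int) (m : Int) (out : Int) : Decidable (Spec_solve n s d m out) := by unfold Spec_solve; infer_instance

-- ===== CLAIM (what is proved, stated in full; the proofs are below) =====
def Claim_equal_solve : Prop := ∀ (n : Int) (s : List Int) (d : Int) (m : Int), Dom_solve n s d m → Pre_solve n s d m → Spec_solve n s d m (solve n s d m)

-- ===== LEMMAS AND PROOFS =====

-- the prefix-building foldl characterised
theorem pv_foldl_prefix (l : List Int) (t : Int) (p : List Int) :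
    (l.foldl (fun (st : Int × List Int) x => (st.1 + x, st.2 ++ [st.1 + x])) (t, p))
    = (t + l.sum, p ++ (List.range l.length).map (fun k => t + (l.take (k+1)).sum)) := by
  induction l generalizing t p with
  | nil => simp
  | cons x xs ih =>
    rw [List.foldl_cons, ih]
    refine Prod.ext (by simp; ring) ?_
    simp only [List.length_cons, List.range_succ_eq_map, List.map_cons, List.map_map,
      List.append_assoc, List.singleton_append]
    congr 1
    simp only [List.take_succ_cons, List.take_zero, List.cons.injEq]
    refine ⟨by simp, ?_⟩
    apply List.map_congr_left; intro k _
    simp only [Function.comp, List.sum_cons]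
    ring

-- foldl of a conditional add is an initial value plus a filtered sum
theorem pv_foldl_if_add (l : List Int) (c : Int → Bool) (g : Int → Int) (a : Int) :
    (l.foldl (fun acc j => if c j then acc + g j else acc) a)
    = a + ((l.filter c).map g).sum := by
  induction l generalizing a with
  | nil => simp
  | cons x xs ih =>
    by_cases h : c x <;> simp [List.foldl_cons, h, ih, add_assoc]

-- filtering an increasing range by an upper bound truncates the range
theorem pv_filter_pyRange (b K : Int) :
    ((PySem.List.pyRange 1 b 1).filter (fun j => decide (j ≤ K)))
    = PySem.List.pyRange 1 (min b (K + 1)) 1 := by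
  rcases le_or_gt b 1 with hb | hb
  · rw [PySem.List.pyRange_one_eq_nil hb, PySem.List.pyRange_one_eq_nil (by omega)]
    rfl
  · obtain ⟨t, ht⟩ : ∃ t : Nat, b = 1 + (t : Int) := ⟨(b - 1).toNat, by omega⟩
    subst ht
    induction t with
    | zero => simp [PySem.List.pyRange_one_eq_nil]
    | succ t iht =>
      rcases le_or_gt (1 + (t:Int)) 1 with h1 | h1
      · have ht0 : (t : Int) = 0 := by omega
        rw [show (1 + ((t:Nat)+1 : Nat) : Int) = 1 + 1 by push_cast; omega]
        rw [PySem.List.pyRange_one_cons (by omega), PySem.List.pyRange_one_eq_nil (by omega)]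
        by_cases hK : (1:Int) ≤ K
        · rw [PySem.List.pyRange_one_cons (by omega), PySem.List.pyRange_one_eq_nil (by omega)]
          simp [hK]
        · rw [PySem.List.pyRange_one_eq_nil (by omega)]
          simp [hK]
      · rw [show (1 + ((t:Nat)+1 : Nat) : Int) = (1 + (t:Int)) + 1 by push_cast; ring]
        rw [PySem.List.pyRange_one_succ_right (by omega), List.filter_append, iht h1]
        by_cases hK : (1 + (t:Int)) ≤ K
        · rw [show min ((1+(t:Int))+1) (K+1) = min (1+(t:Int)) (K+1) + 1 by omega]
          rw [PySem.List.pyRange_one_succ_right (by omega)]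
          simp [hK]
          omega
        · rw [show min ((1+(t:Int))+1) (K+1) = min (1+(t:Int)) (K+1) by omega]
          simp [hK]

-- sum of s.getD over a contiguous nat range is a drop/take sum (getD = 0 past the end)
theorem pv_sum_getD_range (s : List Int) (a w : Nat) :
    (((List.range w).map (fun k => s.getD (a+k) 0)).sum) = ((s.drop a).take w).sum := by
  induction w with
  | zero => simp
  | succ w ih =>
    rw [List.range_succ, List.map_append, List.sum_append, ih, List.take_add_one, List.sum_append]
    simp only [List.getD_eq_getElem?_getD, List.getElem?_drop, List.map_cons, List.map_nil,
      List.sum_cons, List.sum_nil, add_zero]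
    cases hx : s[a + w]? <;> simp

-- difference of two prefix sums is a segment sum
theorem pv_take_sum_sub (s : List Int) (a b : Nat) (hab : a ≤ b) :
    (s.take b).sum - (s.take a).sum = ((s.drop a).take (b - a)).sum := by
  have h : s.take b = s.take a ++ (s.drop a).take (b - a) := by
    conv_lhs => rw [show b = a + (b - a) by omega]
    rw [List.take_add]
  rw [h, List.sum_append]
  ring

-- the prefix list of B, read at a nat index ≤ N, is the prefix sum of s
theorem pv_prefix_get (s : List Int) (N : Nat) (hN : N ≤ s.length) (k : Nat) (hk : k ≤ N) :
    PySem.List.pyGetD (((PySem.List.slice s none (some (N:Int))).foldl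
      (fun (st : Int × List Int) x => (st.1 + x, st.2 ++ [st.1 + x])) (0, [0])).2) (k : Int) 0
    = (s.take k).sum := by
  rw [PySem.List.slice_to_natCast, pv_foldl_prefix]
  rw [PySem.List.pyGetD_natCast]
  have hlen : (s.take N).length = N := by simp [hN]
  rcases Nat.eq_zero_or_pos k with hk0 | hk0
  · subst hk0; simp
  · obtain ⟨k', rfl⟩ : ∃ k', k = k' + 1 := ⟨k - 1, by omega⟩
    rw [show ([(0:Int)] ++ (List.range (s.take N).length).map (fun j => 0 + ((s.take N).take (j+1)).sum))
        = (0:Int) :: (List.range (s.take N).length).map (fun j => 0 + ((s.take N).take (j+1)).sum) by rfl]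
    rw [List.getD_cons_succ]
    rw [List.getD_eq_getElem?_getD]
    rw [List.getElem?_map]
    rw [List.getElem?_range (by omega : k' < (s.take N).length)]
    simp [List.take_take, Nat.min_eq_left (show k'+1 ≤ N by omega)]

-- A's inner window scan equals a difference of prefix sums of s
theorem pv_window (s : List Int) (N : Nat) (hN : N ≤ s.length) (m : Int) (a : Nat) (ha : a < N) :
    ((PySem.List.pyRange 1 m 1).foldl
      (fun cur j => if (a:Int) + j ≤ (N:Int) - 1 then cur + PySem.List.pyGetD s ((a:Int) + j) 0 else cur)
      (PySem.List.pyGetD s (a:Int) 0))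
    = (s.take (min ((a:Int) + (if m > 1 then m else 1)) (N:Int)).toNat).sum - (s.take a).sum := by
  have hcond : ∀ j : Int, ((a:Int) + j ≤ (N:Int) - 1) ↔ (j ≤ (N:Int) - 1 - a) := by intro j; omega
  have step_eq : ((PySem.List.pyRange 1 m 1).foldl
      (fun cur j => if (a:Int) + j ≤ (N:Int) - 1 then cur + PySem.List.pyGetD s ((a:Int) + j) 0 else cur)
      (PySem.List.pyGetD s (a:Int) 0))
      = ((PySem.List.pyRange 1 m 1).foldl
      (fun cur j => if decide (j ≤ (N:Int) - 1 - a) then cur + PySem.List.pyGetD s ((a:Int) + j) 0 else cur)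
      (PySem.List.pyGetD s (a:Int) 0)) := by
    apply PySem.List.foldl_congr_mem
    intro acc x _
    by_cases h : x ≤ (N:Int) - 1 - a
    · have h2 : (a:Int) + x ≤ (N:Int) - 1 := (hcond x).mpr h
      simp [h, h2]
    · have h2 : ¬ ((a:Int) + x ≤ (N:Int) - 1) := fun hh => h ((hcond x).mp hh)
      simp [h, h2]
  rw [step_eq, pv_foldl_if_add, pv_filter_pyRange]
  -- K = min m (N - a) : the truncated window width beyond position a (counting position a itself below)
  set K : Int := min m ((N:Int) - 1 - a + 1) with hK
  have hKdef : K = min m ((N:Int) - a) := by omega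
  set W : Nat := (K - 1).toNat with hW
  have hmap : (((PySem.List.pyRange 1 K 1).map (fun j => PySem.List.pyGetD s ((a:Int) + j) 0)).sum)
      = ((List.range W).map (fun k => s.getD (a+1+k) 0)).sum := by
    rw [PySem.List.pyRange_one, show (K - 1).toNat = W from rfl, List.map_map]
    apply congrArg
    apply List.map_congr_left
    intro k _
    simp only [Function.comp]
    rw [show (a:Int) + (1 + (k:Int)) = ((a+1+k : Nat) : Int) by push_cast; ring]
    rw [PySem.List.pyGetD_natCast]
  rw [hmap, pv_sum_getD_range]
  have hsa : PySem.List.pyGetD s (a:Int) 0 = s.getD a 0 := by rw [PySem.List.pyGetD_natCast]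
  have hdropa : s.drop a = s.getD a 0 :: s.drop (a+1) := by
    have halen : a < s.length := by omega
    rw [List.drop_eq_getElem_cons halen, List.getD_eq_getElem?_getD, List.getElem?_eq_getElem halen]
    rfl
  have hcomb : PySem.List.pyGetD s (a:Int) 0 + ((s.drop (a+1)).take W).sum
      = ((s.drop a).take (W+1)).sum := by
    rw [hsa, hdropa]
    simp [List.take_succ_cons]
  have he : (min ((a:Int) + (if m > 1 then m else 1)) (N:Int)).toNat = a + (W + 1) := by
    by_cases hm : m > 1
    · rw [if_pos hm]; omega
    · rw [if_neg hm]; omega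
  rw [hcomb, he, pv_take_sum_sub s a (a + (W+1)) (by omega)]
  rw [Nat.add_sub_cancel_left]

-- ===== VERDICT (by name: the statement is the Claim_ definition above) =====
theorem solve_spec : Claim_equal_solve := by
  intro n s d m _ hpre
  unfold Spec_solve solve solve_alt
  rcases le_or_gt n 0 with hn | hn
  · rw [PySem.List.pyRange_one_eq_nil hn]
    simp
  · obtain ⟨N, rfl⟩ : ∃ N : Nat, n = (N : Int) := ⟨n.toNat, by omega⟩
    have hN : N ≤ s.length := by unfold Pre_solve at hpre; omega
    simp only []
    congr 1
    apply PySem.List.foldl_congr_mem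
    intro st i hi
    have hi' := (PySem.List.mem_pyRange_one).mp hi
    obtain ⟨a, rfl⟩ : ∃ a : Nat, i = (a : Int) := ⟨i.toNat, by omega⟩
    have ha : a < N := by omega
    by_cases hb : st.2 + 1 = m ∧ PySem.List.pyGetD s (a:Int) 0 = d
    · simp [hb]
    · simp only [hb, if_false]
      rw [pv_window s N hN m a ha]
      have hi1 : min ((a:Int) + (if m > 1 then m else 1)) (N:Int)
          = ((min ((a:Int) + (if m > 1 then m else 1)) (N:Int)).toNat : Int) := by
        by_cases hm : m > 1
        · rw [if_pos hm]; omega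
        · rw [if_neg hm]; omega
      have h1 : PySem.List.pyGetD (((PySem.List.slice s none (some (N:Int))).foldl
            (fun (st : Int × List Int) x => (st.1 + x, st.2 ++ [st.1 + x])) (0, [0])).2)
            (min ((a:Int) + (if m > 1 then m else 1)) (N:Int)) 0
          = (s.take (min ((a:Int) + (if m > 1 then m else 1)) (N:Int)).toNat).sum := by
        rw [hi1]
        refine pv_prefix_get s N hN _ ?_
        by_cases hm : m > 1
        · rw [if_pos hm]; omega
        · rw [if_neg hm]; omega
      have h2 : PySem.List.pyGetD (((PySem.List.slice s none (some (N:Int))).foldl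
            (fun (st : Int × List Int) x => (st.1 + x, st.2 ++ [st.1 + x])) (0, [0])).2)
            ((a:Int)) 0 = (s.take a).sum := pv_prefix_get s N hN a (by omega)
      rw [h1, h2]
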